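-- pv_equiv track=rewrite | github.com/suminjeff/baekjoon | 백준/Silver/2003. 수들의 합 2/수들의 합 2.py | solve
-- ===== SOURCE A (Python) =====
-- def solve(n, m, a):
--     answer = 0
--
--     start, end = 0, 1
--     _sum = 0
--
--     while end <= n:
--         tmp = sum(a[start:end])
--         if tmp <= m:
--             if tmp == m:
--                 answer += 1
--             end += 1
--         else:
--             start += 1
--
--     return answer
-- ===== SOURCE B (Python) =====
-- def solve(n, m, a):
--     # two-pointer sliding window with an incremental running sum
--     answer = 0
--     s = 0
--     start = 0
--     for end in range(n):
--         s += a[end]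
--         while s > m:
--             s -= a[start]
--             start += 1
--         if s == m:
--             answer += 1
--     return answer
-- ===== Notes on version B (the rewrite author's own statement) =====
-- stated objective: faster
-- what changed: Replaced A's while-loop that re-sums the slice a[start:end] from scratch on every step with a single two-pointer sliding window maintaining the window sum incrementally; Pre_ excludes m < 0 (A's loop diverges on most such inputs and the terminating exceptions have no closed form) and n > len(a), where A's clamped slices silently read past the end of the array while the plain window loop raises IndexError.
-- outside the precondition, e.g. on solve(2, -1, [-1, -1]): A returns 1, B returns 1; on solve(3, 3, [1, 2]): A returns 2, B raises IndexError; on solve(1, -1, []): A does not finish within the time limit, B raises IndexError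
import Mathlib
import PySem

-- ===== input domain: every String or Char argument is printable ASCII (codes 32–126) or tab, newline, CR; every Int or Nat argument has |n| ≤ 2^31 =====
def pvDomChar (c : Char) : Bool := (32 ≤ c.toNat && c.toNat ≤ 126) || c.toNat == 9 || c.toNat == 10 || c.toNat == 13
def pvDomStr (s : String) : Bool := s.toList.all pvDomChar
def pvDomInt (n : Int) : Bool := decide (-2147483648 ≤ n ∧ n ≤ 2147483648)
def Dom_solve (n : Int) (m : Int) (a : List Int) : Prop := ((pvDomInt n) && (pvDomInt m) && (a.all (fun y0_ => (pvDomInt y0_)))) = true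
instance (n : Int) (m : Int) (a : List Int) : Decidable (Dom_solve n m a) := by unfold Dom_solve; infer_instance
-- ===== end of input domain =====

-- B replaces A's quadratic re-summing while-loop by an O(n) two-pointer sliding window
-- maintaining the window sum incrementally; proved equal to A on Pre_ (0 ≤ m ∧ n ≤ len a).

-- ===== PORT A =====
-- A's single while-loop: each iteration either advances `end` (sum ≤ m, counting hits)
-- or advances `start` (sum > m); the slice sum is recomputed from scratch each time.
-- The loop is not total in Python (it diverges for some m < 0), so the port carries a
-- fuel counter; 2*n+2 fuel is proved sufficient on Pre_, where A always returns.
def solveLoopA (m : Int) (a : List Int) (n : Int) (start e ans : Int) : Nat → Int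
  | 0 => ans
  | Nat.succ f =>
    if e ≤ n then
      let tmp := (PySem.List.slice a (some start) (some e)).sum
      if tmp ≤ m then
        solveLoopA m a n start (e + 1) (if tmp = m then ans + 1 else ans) f
      else
        solveLoopA m a n (start + 1) e ans f
    else ans

def solve (n : Int) (m : Int) (a : List Int) : Int :=
  solveLoopA m a n 0 1 0 (2 * n.toNat + 2)

-- ===== PORT B =====
-- Source B's inner `while s > m: s -= a[start]; start += 1`; not total for arbitrary inputs,
-- so the port carries a fuel counter (proved sufficient on Pre_, where the loop always
-- stops with start ≤ end+1 and a[start] in range, so List.getD is exact for a[start]).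
def shrinkB (m : Int) (a : List Int) (start : Nat) (s : Int) : Nat → Nat × Int
  | 0 => (start, s)
  | Nat.succ f =>
    if m < s then shrinkB m a (start + 1) (s - a.getD start 0) f
    else (start, s)

-- Source B's `for end in range(n): s += a[end]; <shrink>; if s == m: answer += 1`
def loopB (m : Int) (a : List Int) (nn e start : Nat) (s ans : Int) : Int :=
  if e < nn then
    let p := shrinkB m a start (s + a.getD e 0) (e + 1)
    loopB m a nn (e + 1) p.1 p.2 (if p.2 = m then ans + 1 else ans)
  else ans
termination_by nn - e
decreasing_by omega

def solve_alt (n : Int) (m : Int) (a : List Int) : Int :=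
  loopB m a n.toNat 0 0 0 0

-- ===== PRECONDITION & SPEC =====
-- Pre_ excludes m < 0, where A's while-loop diverges on most inputs (the terminating
-- exceptions have no closed form; see cites), and n > len(a), where A's clamped slices
-- silently read past the end of the array while B's plain window loop raises IndexError.
def Pre_solve (n : Int) (m : Int) (a : List Int) : Prop := 0 ≤ m ∧ n ≤ (a.length : Int)
instance (n : Int) (m : Int) (a : List Int) : Decidable (Pre_solve n m a) := by unfold Pre_solve; infer_instance

def pvWitness_solve : Int × Int × List Int := (4, 5, [1, 2, 3, 2, 5])

def Spec_solve (n : Int) (m : Int) (a : List Int) (out : Int) : Prop := out = solve_alt n m a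
instance (n : Int) (m : Int) (a : List Int) (out : Int) : Decidable (Spec_solve n m a out) := by unfold Spec_solve; infer_instance

-- ===== CLAIM =====
def Claim_equal_solve : Prop := ∀ (n : Int) (m : Int) (a : List Int), Dom_solve n m a → Pre_solve n m a → Spec_solve n m a (solve n m a)

-- ===== LEMMAS AND PROOFS =====

-- the sum of the window a[s:e], as both programs see it
def segSum (a : List Int) (s e : Nat) : Int := ((a.drop s).take (e - s)).sum

theorem sliceSum_eq_segSum (a : List Int) (s e : Nat) :
    (PySem.List.slice a (some (s : Int)) (some (e : Int))).sum = segSum a s e := by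
  rw [PySem.List.slice_natCast]; rfl

theorem segSum_append_right (a : List Int) (s e : Nat) (hse : s ≤ e) (he : e < a.length) :
    segSum a s (e + 1) = segSum a s e + a.getD e 0 := by
  unfold segSum
  have h1 : e + 1 - s = (e - s) + 1 := by omega
  rw [h1, List.take_add_one]
  have h2 : (a.drop s)[e - s]? = some a[e] := by
    rw [List.getElem?_drop]
    have hs : s + (e - s) = e := by omega
    rw [hs, List.getElem?_eq_getElem he]
  rw [h2]
  simp [List.getD, List.getElem?_eq_getElem he]

theorem segSum_drop_left (a : List Int) (s e : Nat) (hse : s < e) (hs : s < a.length) :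
    segSum a (s + 1) e = segSum a s e - a.getD s 0 := by
  unfold segSum
  rw [List.drop_eq_getElem_cons hs]
  have h1 : e - s = (e - (s + 1)) + 1 := by omega
  rw [h1, List.take_succ_cons]
  simp [List.getD, List.getElem?_eq_getElem hs]

theorem segSum_empty (a : List Int) (s e : Nat) (h : e ≤ s) : segSum a s e = 0 := by
  unfold segSum
  have : e - s = 0 := by omega
  simp [this]

theorem shrinkB_done (m : Int) (a : List Int) (start : Nat) (s : Int) (h : ¬ m < s) :
    ∀ F, shrinkB m a start s F = (start, s) := by
  intro F; cases F with
  | zero => rfl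
  | succ f => rw [shrinkB]; simp [h]

theorem shrinkB_step (m : Int) (a : List Int) (start : Nat) (s : Int) (F : Nat) (h : m < s) :
    shrinkB m a start s (F + 1) = shrinkB m a (start + 1) (s - a.getD start 0) F := by
  rw [shrinkB]; simp [h]

-- with invariant s = segSum a start e, m ≥ 0, the shrink loop stops within e - start
-- steps, so any two sufficient fuels give the same result
theorem shrinkB_fuel (m : Int) (a : List Int) (e : Nat) (hm : 0 ≤ m) (he : e ≤ a.length) :
    ∀ (F F' start : Nat), start ≤ e → e - start ≤ F → e - start ≤ F' →
      shrinkB m a start (segSum a start e) F = shrinkB m a start (segSum a start e) F' := by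
  intro F
  induction F with
  | zero =>
    intro F' start h1 h2 _
    have hs : start = e := by omega
    have : ¬ m < segSum a start e := by rw [hs, segSum_empty a e e (le_refl _)]; omega
    rw [shrinkB_done m a start _ this, shrinkB_done m a start _ this]
  | succ F ih =>
    intro F' start h1 h2 h3
    by_cases hc : m < segSum a start e
    · have hlt : start < e := by
        by_contra hge
        have hs : start = e := by omega
        rw [hs, segSum_empty a e e (le_refl _)] at hc; omega
      obtain ⟨F'', rfl⟩ : ∃ F'', F' = F'' + 1 := ⟨F' - 1, by omega⟩
      rw [shrinkB_step m a start _ F hc, shrinkB_step m a start _ F'' hc,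
          ← segSum_drop_left a start e hlt (by omega)]
      exact ih F'' (start + 1) (by omega) (by omega) (by omega)
    · rw [shrinkB_done m a start _ hc, shrinkB_done m a start _ hc]

-- B's whole iteration at index e, starting from the already-augmented sum,
-- with the shrink fuel in canonical form e + 1 - start
def loopBmid (m : Int) (a : List Int) (nn e start : Nat) (s ans : Int) : Int :=
  if e < nn then
    let p := shrinkB m a start s (e + 1 - start)
    loopB m a nn (e + 1) p.1 p.2 (if p.2 = m then ans + 1 else ans)
  else ans

theorem loopB_eq_mid (m : Int) (a : List Int) (nn e start : Nat) (ans : Int)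
    (hm : 0 ≤ m) (hnn : nn ≤ a.length) (hse : start ≤ e) :
    loopB m a nn e start (segSum a start e) ans
      = loopBmid m a nn e start (segSum a start (e + 1)) ans := by
  rw [loopB, loopBmid]
  by_cases h : e < nn
  · simp only [h, if_pos]
    rw [← segSum_append_right a start e hse (by omega),
        shrinkB_fuel m a (e + 1) hm (by omega) (e + 1) (e + 1 - start) start
          (by omega) (by omega) (by omega)]
  · simp [h]

-- the master alignment: A's fueled loop at state (start, e+1) equals B's iteration e
theorem main_align (m : Int) (a : List Int) (n : Int) (hm : 0 ≤ m)
    (hn : n.toNat ≤ a.length) :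
    ∀ (F : Nat) (e start : Nat) (ans : Int),
      e ≤ n.toNat → start ≤ e + 1 → 2 * (n.toNat - e) + (e + 1 - start) + 1 ≤ F →
      solveLoopA m a n (start : Int) ((e : Int) + 1) ans F
        = loopBmid m a n.toNat e start (segSum a start (e + 1)) ans := by
  intro F
  induction F with
  | zero => intro e start ans _ _ hF; omega
  | succ F ih =>
    intro e start ans he hstart hF
    rw [solveLoopA]
    by_cases hen : e < n.toNat
    · have hcond : (e : Int) + 1 ≤ n := by omega
      rw [if_pos hcond]
      have htmp : (PySem.List.slice a (some (start : Int)) (some ((e : Int) + 1))).sum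
          = segSum a start (e + 1) := by
        have : ((e : Int) + 1) = ((e + 1 : Nat) : Int) := by push_cast; ring
        rw [this]
        exact sliceSum_eq_segSum a start (e + 1)
      rw [htmp]
      by_cases hle : segSum a start (e + 1) ≤ m
      · rw [if_pos hle]
        -- A advances end; B's shrink is a no-op
        rw [loopBmid, if_pos hen]
        rw [shrinkB_done m a start _ (by omega)]
        simp only []
        have h1 : ((e : Int) + 1 + 1) = ((e + 1 : Nat) : Int) + 1 := by push_cast; ring
        rw [h1]
        rw [ih (e + 1) start _ (by omega) (by omega) (by omega)]
        rw [← loopB_eq_mid m a n.toNat (e + 1) start _ hm hn hstart]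
      · rw [if_neg hle]
        -- A advances start; B's shrink takes one step
        rw [not_le] at hle
        have hstart_le : start ≤ e := by
          by_contra hgt
          have heq : start = e + 1 := by omega
          rw [heq, segSum_empty a (e + 1) (e + 1) (le_refl _)] at hle
          omega
        rw [loopBmid, if_pos hen]
        have hfuel : e + 1 - start = (e - start) + 1 := by omega
        rw [hfuel, shrinkB_step m a start _ (e - start) hle,
            ← segSum_drop_left a start (e + 1) (by omega) (by omega)]
        have h1 : (start : Int) + 1 = ((start + 1 : Nat) : Int) := by push_cast; ring
        rw [h1]
        rw [ih e (start + 1) ans he (by omega) (by omega)]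
        rw [loopBmid, if_pos hen]
        have : e + 1 - (start + 1) = e - start := by omega
        rw [this]
    · -- e = n.toNat: both sides finish
      have hcond : ¬ ((e : Int) + 1 ≤ n) := by omega
      rw [if_neg hcond, loopBmid, if_neg (by omega)]

-- ===== VERDICT =====
theorem solve_spec : Claim_equal_solve := by
  intro n m a _hdom hpre
  obtain ⟨hm, hn⟩ := hpre
  have hn' : n.toNat ≤ a.length := by omega
  unfold Spec_solve solve solve_alt
  have hmain := main_align m a n hm hn' (2 * n.toNat + 2) 0 0 0 (by omega) (by omega) (by omega)
  norm_num at hmain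
  have hmid := loopB_eq_mid m a n.toNat 0 0 0 hm hn' (le_refl _)
  rw [segSum_empty a 0 0 (le_refl _)] at hmid
  norm_num at hmid
  rw [hmain, ← hmid]
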